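-- pv_equiv track=rewrite | github.com/SmartestWashingMachine/mango2 | src/gandy/tasks/task5/a_is_close_substring_of_b.py | chars_in_b
-- ===== SOURCE A (Python) =====
-- def char_count(t: str):
--     data = {}  # key = character string. value = number of times it's in the string.
--     for char in t:
--         if char not in data:
--             data[char] = 0
--
--         data[char] += 1
--
--     return data
--
-- def chars_in_b(a: str, b: str):
--     """
--     aaab
--     aabbc
--
--     it should be 2a, 1b == 3
--
--     aabb
--     aaaabbb
--
--     it should be 2a, 2b == 4
--     """
--
--     matching_count = 0
--
--     # a_char_cnt = char_count(a)
--     b_char_cnt = char_count(b)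
--
--     for a_char in a:
--         if a_char in b_char_cnt:
--             matching_count += 1
--
--             # Update counter.
--             b_char_cnt[a_char] -= 1
--             if b_char_cnt[a_char] <= 0:
--                 del b_char_cnt[a_char]
--
--     return matching_count
-- ===== SOURCE B (Python) =====
-- def chars_in_b(a: str, b: str):
--     ca = {}
--     for ch in a:
--         ca[ch] = ca.get(ch, 0) + 1
--     cb = {}
--     for ch in b:
--         cb[ch] = cb.get(ch, 0) + 1
--     return sum(min(n, cb.get(ch, 0)) for ch, n in ca.items())
-- ===== Notes on version B (the rewrite author's own statement) =====
-- stated objective: simpler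
-- what changed: Replaces A's consuming scan over a (decrementing and deleting entries of b's count dict) with building both character counters once and summing the per-character minima over a's distinct characters.
import Mathlib
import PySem

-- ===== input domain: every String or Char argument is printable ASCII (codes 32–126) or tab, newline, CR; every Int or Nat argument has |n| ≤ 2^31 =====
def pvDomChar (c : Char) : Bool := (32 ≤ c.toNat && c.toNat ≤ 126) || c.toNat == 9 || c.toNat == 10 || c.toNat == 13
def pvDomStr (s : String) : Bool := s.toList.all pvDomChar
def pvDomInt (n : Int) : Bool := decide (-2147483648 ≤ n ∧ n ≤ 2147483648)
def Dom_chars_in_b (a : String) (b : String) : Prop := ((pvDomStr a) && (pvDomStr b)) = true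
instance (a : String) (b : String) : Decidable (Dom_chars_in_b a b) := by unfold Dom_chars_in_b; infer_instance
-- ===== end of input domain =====

-- B replaces A's consuming scan (decrement/delete on b's count dict) with two counters and a
-- sum of per-character minima; objective: simpler.

-- ===== PORT A =====
def char_count (t : String) : PySem.Dict Char Int :=
  t.toList.foldl (fun data char =>
    let data := if data.contains char then data else data.insert char 0
    data.insert char (data.getD char 0 + 1)) PySem.Dict.empty

-- the body of A's `for a_char in a` loop, named so the lemmas can speak about it
def pvStepA (st : Int × PySem.Dict Char Int) (a_char : Char) : Int × PySem.Dict Char Int :=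
  if st.2.contains a_char then
    let d := st.2.insert a_char (st.2.getD a_char 0 - 1)
    (st.1 + 1, if d.getD a_char 0 ≤ 0 then d.erase a_char else d)
  else st

def chars_in_b (a : String) (b : String) : Int :=
  let b_char_cnt := char_count b
  (a.toList.foldl pvStepA (0, b_char_cnt)).1

-- ===== PORT B =====
def chars_in_b_alt (a : String) (b : String) : Int :=
  let ca := a.toList.foldl (fun d ch => d.insert ch (d.getD ch 0 + 1)) PySem.Dict.empty
  let cb := b.toList.foldl (fun d ch => d.insert ch (d.getD ch 0 + 1)) PySem.Dict.empty
  ca.items.foldl (fun s p => s + min p.2 (cb.getD p.1 0)) 0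

-- ===== PRECONDITION & SPEC =====
def Spec_chars_in_b (a : String) (b : String) (out : Int) : Prop := out = chars_in_b_alt a b
instance (a : String) (b : String) (out : Int) : Decidable (Spec_chars_in_b a b out) := by unfold Spec_chars_in_b; infer_instance

-- ===== CLAIM (what is proved, stated in full; the proofs are below) =====
def Claim_equal_chars_in_b : Prop := ∀ (a : String) (b : String), Dom_chars_in_b a b → Spec_chars_in_b a b (chars_in_b a b)

-- ===== LEMMAS AND PROOFS =====

-- mathematical model of A's loop: consume one unit of f x per matched character
def pvMsum : List Char → (Char → Int) → Int
  | [], _ => 0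
  | x :: r, f => if 0 < f x then 1 + pvMsum r (Function.update f x (f x - 1)) else pvMsum r f

theorem pv_get?_erase {d : PySem.Dict Char Int} {k k' : Char} :
    (d.erase k).get? k' = if k' = k then none else d.get? k' := by
  simp only [PySem.Dict.erase, PySem.Dict.get?]
  induction d.items with
  | nil => simp
  | cons p rest ih =>
    by_cases h : k' = k <;> by_cases h2 : p.1 = k <;> by_cases h3 : p.1 = k' <;>
      simp_all

theorem pv_char_count_eq (t : String) :
    char_count t = PySem.Dict.counter t.toList := by
  have hstep : (fun (data : PySem.Dict Char Int) char =>
      let data := if data.contains char then data else data.insert char 0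
      data.insert char (data.getD char 0 + 1))
      = fun d c => d.insert c (d.getD c 0 + 1) := by
    funext d c
    by_cases h : d.contains c
    · simp [h]
    · have h0 : d.getD c 0 = 0 :=
        PySem.Dict.getD_of_not_contains d 0 (by simpa using h)
      simp [h, h0, PySem.Dict.insert_insert_self, PySem.Dict.getD_insert_self]
  rw [char_count, hstep, PySem.Dict.foldl_insert_getD_add_one_eq_counter]

-- the dictionary A's loop body produces from d on a matched character x
def pvStepD (d : PySem.Dict Char Int) (x : Char) : PySem.Dict Char Int :=
  if (d.insert x (d.getD x 0 - 1)).getD x 0 ≤ 0 then (d.insert x (d.getD x 0 - 1)).erase x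
  else d.insert x (d.getD x 0 - 1)

theorem pv_stepD_getD (d : PySem.Dict Char Int) (x : Char) (hv : 0 < d.getD x 0) (c : Char) :
    (pvStepD d x).getD c 0 = Function.update (fun c => d.getD c 0) x (d.getD x 0 - 1) c := by
  unfold pvStepD
  rw [PySem.Dict.getD_insert_self]
  by_cases hc : c = x
  · subst hc
    split_ifs with hle
    · rw [PySem.Dict.getD_eq_get?_getD, pv_get?_erase]
      simp [Function.update]
      omega
    · simp [PySem.Dict.getD_insert_self, Function.update]
  · have h1 : (d.insert x (d.getD x 0 - 1)).getD c 0 = d.getD c 0 := by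
      rw [PySem.Dict.getD_insert]; simp [hc]
    split_ifs with hle
    · rw [PySem.Dict.getD_eq_get?_getD, pv_get?_erase, if_neg hc,
        ← PySem.Dict.getD_eq_get?_getD]
      simp [h1, Function.update, hc]
    · simp [h1, Function.update, hc]

theorem pv_stepD_pos (d : PySem.Dict Char Int) (x : Char)
    (hpos : ∀ c, d.contains c = true → 0 < d.getD c 0) (hv : 0 < d.getD x 0) :
    ∀ c, (pvStepD d x).contains c = true → 0 < (pvStepD d x).getD c 0 := by
  intro c hc
  rw [pv_stepD_getD d x hv c]
  by_cases hcx : c = x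
  · subst hcx
    rw [Function.update_self]
    unfold pvStepD at hc
    rw [PySem.Dict.getD_insert_self] at hc
    split_ifs at hc with hle
    · rw [PySem.Dict.contains_eq_isSome_get?, pv_get?_erase] at hc; simp at hc
    · omega
  · rw [Function.update_of_ne hcx]
    apply hpos
    unfold pvStepD at hc
    split_ifs at hc with hle <;>
      rw [PySem.Dict.contains_eq_isSome_get?] at hc ⊢
    · rw [pv_get?_erase] at hc
      simp only [hcx, if_false] at hc
      rwa [PySem.Dict.get?_insert, if_neg hcx] at hc
    · rwa [PySem.Dict.get?_insert, if_neg hcx] at hc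

theorem pv_loopA (as : List Char) (d : PySem.Dict Char Int) (acc : Int)
    (hpos : ∀ c, d.contains c = true → 0 < d.getD c 0) :
    (as.foldl pvStepA (acc, d)).1 = acc + pvMsum as (fun c => d.getD c 0) := by
  induction as generalizing d acc with
  | nil => simp [pvMsum]
  | cons x r ih =>
    by_cases h : d.contains x
    · have hv : 0 < d.getD x 0 := hpos x h
      have hstep : pvStepA (acc, d) x = (acc + 1, pvStepD d x) := by
        simp only [pvStepA, pvStepD, h, if_true]
      rw [List.foldl_cons, hstep, ih (pvStepD d x) (acc + 1) (pv_stepD_pos d x hpos hv)]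
      have hfun : (fun c => (pvStepD d x).getD c 0)
          = Function.update (fun c => d.getD c 0) x (d.getD x 0 - 1) :=
        funext (pv_stepD_getD d x hv)
      rw [hfun]
      simp only [pvMsum, hv, if_pos]
      ring
    · have h0 : d.getD x 0 = 0 :=
        PySem.Dict.getD_of_not_contains d 0 (by simpa using h)
      have hstep : pvStepA (acc, d) x = (acc, d) := by simp [pvStepA, h]
      rw [List.foldl_cons, hstep, ih d acc hpos]
      simp [pvMsum, h0]

theorem pv_msum_eq_sum (as : List Char) (f : Char → Int) (hf : ∀ c, 0 ≤ f c) :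
    pvMsum as f = ∑ c ∈ as.toFinset, min (as.count c : Int) (f c) := by
  induction as generalizing f with
  | nil => simp [pvMsum]
  | cons x r ih =>
    by_cases hx : 0 < f x
    · have hupd : ∀ c, 0 ≤ Function.update f x (f x - 1) c := by
        intro c
        have := hf c
        by_cases hc : c = x <;> simp [Function.update, hc] <;> omega
      have lhs1 : pvMsum (x :: r) f = 1 + ∑ c ∈ r.toFinset,
          min (r.count c : Int) (Function.update f x (f x - 1) c) := by
        simp only [pvMsum, hx, if_pos]
        rw [ih _ hupd]
      by_cases hm : x ∈ r.toFinset
      · rw [lhs1, List.toFinset_cons, Finset.insert_eq_self.mpr hm]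
        rw [← Finset.add_sum_erase _ _ hm, ← Finset.add_sum_erase _ _ hm]
        have hxterm : min ((x :: r).count x : Int) (f x)
            = 1 + min ((r.count x : Int)) (Function.update f x (f x - 1) x) := by
          rw [List.count_cons_self, Function.update_self]
          push_cast
          omega
        rw [hxterm]
        have hrest : ∑ c ∈ r.toFinset.erase x, min ((x :: r).count c : Int) (f c)
            = ∑ c ∈ r.toFinset.erase x,
              min ((r.count c : Int)) (Function.update f x (f x - 1) c) := by
          apply Finset.sum_congr rfl
          intro c hc
          have hcx : c ≠ x := (Finset.mem_erase.mp hc).1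
          rw [List.count_cons_of_ne (Ne.symm hcx), Function.update_of_ne hcx]
        rw [hrest]
        ring
      · rw [lhs1, List.toFinset_cons, Finset.sum_insert hm]
        have hcr : r.count x = 0 := by
          rw [List.count_eq_zero]
          simpa using hm
        have hxterm : min ((x :: r).count x : Int) (f x) = 1 := by
          rw [List.count_cons_self, hcr]
          push_cast
          omega
        rw [hxterm]
        have hrest : ∑ c ∈ r.toFinset, min ((r.count c : Int)) (Function.update f x (f x - 1) c)
            = ∑ c ∈ r.toFinset, min ((x :: r).count c : Int) (f c) := by
          apply Finset.sum_congr rfl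
          intro c hc
          have hcx : c ≠ x := by rintro rfl; exact hm hc
          rw [List.count_cons_of_ne (Ne.symm hcx), Function.update_of_ne hcx]
        rw [hrest]
    · have hx0 : f x = 0 := le_antisymm (by omega) (hf x)
      have lhs1 : pvMsum (x :: r) f = ∑ c ∈ r.toFinset, min (r.count c : Int) (f c) := by
        simp only [pvMsum, hx, if_false]
        exact ih f hf
      rw [lhs1]
      have hrest : ∑ c ∈ r.toFinset, min ((r.count c : Int)) (f c)
          = ∑ c ∈ r.toFinset, min ((x :: r).count c : Int) (f c) := by
        apply Finset.sum_congr rfl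
        intro c hc
        by_cases hcx : c = x
        · subst hcx
          rw [List.count_cons_self, hx0]
          have : (0 : Int) ≤ (r.count c : Int) := by positivity
          omega
        · rw [List.count_cons_of_ne (Ne.symm hcx)]
      rw [hrest]
      by_cases hm : x ∈ r.toFinset
      · rw [List.toFinset_cons, Finset.insert_eq_self.mpr hm]
      · rw [List.toFinset_cons, Finset.sum_insert hm]
        have : min ((x :: r).count x : Int) (f x) = 0 := by
          rw [hx0]
          have : (0 : Int) ≤ ((x :: r).count x : Int) := by positivity
          omega
        rw [this, zero_add]

theorem pv_nodup_foldl_sum (l : List Char) (h : Char → Int) (hnd : l.Nodup) :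
    l.foldl (fun s k => s + h k) (0 : Int) = ∑ c ∈ l.toFinset, h c := by
  rw [PySem.List.foldl_add l h 0, zero_add]
  induction l with
  | nil => simp
  | cons x r ih =>
    have hx : x ∉ r := (List.nodup_cons.mp hnd).1
    rw [List.toFinset_cons, Finset.sum_insert (by simpa using hx), List.map_cons,
      List.sum_cons, ih (List.nodup_cons.mp hnd).2]

theorem pv_alt_eq_sum (a b : String) :
    chars_in_b_alt a b
      = ∑ c ∈ a.toList.toFinset, min ((a.toList.count c : Int)) ((b.toList.count c : Int)) := by
  show List.foldl (fun s p => s + min p.2 ((PySem.Dict.counter b.toList).getD p.1 0)) 0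
    (PySem.Dict.counter a.toList).items = _
  rw [PySem.Dict.items_counter, List.foldl_map]
  have hstep : (fun (s : Int) (k : Char) =>
        s + min (k, (a.toList.count k : Int)).2 ((PySem.Dict.counter b.toList).getD (k, (a.toList.count k : Int)).1 0))
      = fun s k => s + min ((a.toList.count k : Int)) ((b.toList.count k : Int)) := by
    funext s k
    rw [PySem.Dict.getD_counter]
  rw [hstep, ← PySem.List.dedup_eq_ofList,
    pv_nodup_foldl_sum _ _ (PySem.List.nodup_dedup _)]
  apply Finset.sum_congr
  · ext c
    simp
  · intro c _
    rfl

-- ===== VERDICT (by name: the statement is the Claim_ definition above) =====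
theorem chars_in_b_spec : Claim_equal_chars_in_b := by
  intro a b _
  show chars_in_b a b = chars_in_b_alt a b
  unfold chars_in_b
  rw [pv_char_count_eq]
  have hpos : ∀ c, (PySem.Dict.counter b.toList).contains c = true →
      0 < (PySem.Dict.counter b.toList).getD c 0 := by
    intro c hc
    rw [PySem.Dict.getD_counter]
    rw [PySem.Dict.contains_counter] at hc
    have : c ∈ b.toList := by simpa using hc
    exact_mod_cast List.count_pos_iff.mpr this
  rw [pv_loopA a.toList _ 0 hpos, zero_add]
  have hbcnt : (fun c => (PySem.Dict.counter b.toList).getD c 0)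
      = fun c => ((b.toList.count c : Int)) := by
    funext c; rw [PySem.Dict.getD_counter]
  rw [hbcnt, pv_msum_eq_sum _ _ (by intro c; positivity), pv_alt_eq_sum]
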